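-- pv_equiv track=rewrite | github.com/SrinivasBaskar1995/TetrisLinearProgramming | AI.py | drop_stone
-- ===== SOURCE A (Python) =====
-- def check_collision(board, shape, offset):
--     off_x, off_y = offset
--     for cy, row in enumerate(shape):
--         for cx, cell in enumerate(row):
--             try:
--                 if cell and board[ cy + off_y ][ cx + off_x ]:
--                     return True
--             except IndexError:
--                 return True
--     return False
--
-- def remove_row(board, row):
--     del board[row]
--     return [[0 for i in range(20)]] + board
--
-- def join_matrixes(mat1, mat2, mat2_off):
--     off_x, off_y = mat2_off
--     for cy, row in enumerate(mat2):
--         for cx, val in enumerate(row):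
--             mat1[cy+off_y-1	][cx+off_x] += val
--     return mat1
--
-- def drop_stone(stone,stone_x,stone_y,board):
--     while True:
--         stone_y += 1
--         if check_collision(board,stone,(stone_x, stone_y)):
--             board = join_matrixes(board,stone,(stone_x, stone_y))
--             while True:
--                 for i, row in enumerate(board[:-1]):
--                     if 0 not in row:
--                         board = remove_row(board, i)
--                         break
--                 else:
--                     break
--             break
--
--     return board
-- ===== SOURCE B (Python) =====
-- def check_collision(board, shape, offset):
--     off_x, off_y = offset
--     for cy, row in enumerate(shape):
--         for cx, cell in enumerate(row):
--             try:
--                 if cell and board[ cy + off_y ][ cx + off_x ]: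
--                     return True
--             except IndexError:
--                 return True
--     return False
--
-- def join_matrixes(mat1, mat2, mat2_off):
--     off_x, off_y = mat2_off
--     for cy, row in enumerate(mat2):
--         for cx, val in enumerate(row):
--             mat1[cy+off_y-1][cx+off_x] += val
--     return mat1
--
-- def drop_stone(stone, stone_x, stone_y, board):
--     # find the landing height first, then merge, then clear in ONE pass
--     y = stone_y + 1
--     while not check_collision(board, stone, (stone_x, y)):
--         y += 1
--     board = join_matrixes(board, stone, (stone_x, y))
--     body = [row for row in board[:-1] if 0 in row]
--     cleared = len(board) - 1 - len(body)
--     return [[0] * 20 for _ in range(cleared)] + body + [board[-1]]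
-- ===== Notes on version B (the rewrite author's own statement) =====
-- stated objective: simpler
-- what changed: B first computes the landing height with a search loop, then merges once and replaces A's repeated rescan-remove-reinsert clearing loop by a single filter pass that rebuilds the board (blank rows ++ kept rows ++ bottom row).
import Mathlib
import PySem

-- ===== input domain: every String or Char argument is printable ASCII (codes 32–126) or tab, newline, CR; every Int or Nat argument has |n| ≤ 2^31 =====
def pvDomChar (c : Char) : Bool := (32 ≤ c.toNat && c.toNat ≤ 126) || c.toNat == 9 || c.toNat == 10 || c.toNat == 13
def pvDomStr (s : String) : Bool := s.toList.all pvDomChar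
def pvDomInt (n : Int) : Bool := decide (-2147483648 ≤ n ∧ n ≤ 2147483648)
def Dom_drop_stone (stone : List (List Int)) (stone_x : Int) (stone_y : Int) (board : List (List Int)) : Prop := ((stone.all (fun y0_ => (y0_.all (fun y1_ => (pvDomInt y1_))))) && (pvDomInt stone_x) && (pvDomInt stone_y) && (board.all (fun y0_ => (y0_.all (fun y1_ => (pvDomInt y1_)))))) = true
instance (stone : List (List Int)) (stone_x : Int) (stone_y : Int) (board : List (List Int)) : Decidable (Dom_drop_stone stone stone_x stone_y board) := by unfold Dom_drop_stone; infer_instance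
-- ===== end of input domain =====

-- B replaces A's repeated rescan-and-remove clearing loop by one filter pass (and finds the
-- landing height before merging); equivalence is about the RETURN value only — in Python both
-- versions mutate `board` in place via join_matrixes, and A may additionally delete a row of it.

-- ===== PORT A =====

-- "[0 for i in range(20)]" / "[0]*20"
def pvZRow : List Int := List.replicate 20 (0 : Int)

-- "0 not in row"
def pvFull (row : List Int) : Bool := !(row.contains (0 : Int))

-- check_collision: try/except IndexError → pyGet? none counts as a collision
def check_collision (board : List (List Int)) (shape : List (List Int)) (offset : Int × Int) : Bool :=
  (PySem.List.enumerate shape).any (fun ce =>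
    (PySem.List.enumerate ce.2).any (fun cc =>
      (cc.2 != 0) &&
      (match PySem.List.pyGet? board (ce.1 + offset.2) with
       | none => true
       | some brow =>
         match PySem.List.pyGet? brow (cc.1 + offset.1) with
         | none => true
         | some v => v != 0)))

-- "mat1[i][j] += val"; on IndexError (out of range) Python raises — unreachable under Pre_,
-- the port then leaves mat1 unchanged
def pvAddCell (mat1 : List (List Int)) (i j v : Int) : List (List Int) :=
  match PySem.List.pyGet? mat1 i with
  | none => mat1
  | some row =>
    match PySem.List.pyGet? row j with
    | none => mat1
    | some old => PySem.List.pySetD mat1 i (PySem.List.pySetD row j (old + v))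

def join_matrixes (mat1 mat2 : List (List Int)) (mat2_off : Int × Int) : List (List Int) :=
  (PySem.List.enumerate mat2).foldl (fun m cr =>
    (PySem.List.enumerate cr.2).foldl (fun m cv =>
      pvAddCell m (cr.1 + mat2_off.2 - 1) (cv.1 + mat2_off.1) cv.2) m) mat1

-- A's inner clearing loop: rescan board[:-1] for the first full row, remove it, prepend a blank
-- row (remove_row), repeat; fuel bounds the iterations (each one consumes a full row)
def pvClearLoop : Nat → List (List Int) → List (List Int)
  | 0, b => b
  | f + 1, b =>
    match (PySem.List.slice b none (some (-1))).findIdx? pvFull with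
    | some i => pvClearLoop f (pvZRow :: b.eraseIdx i)
    | none => b

-- A's outer "while True" drop loop; fuel bounds the iterations (collision is reached within
-- board.length steps on any input admitted by Pre_)
def pvDropLoop : Nat → List (List Int) → Int → Int → List (List Int) → List (List Int)
  | 0, _, _, _, board => board
  | f + 1, stone, sx, sy, board =>
    let sy' := sy + 1
    if check_collision board stone (sx, sy') then
      let b := join_matrixes board stone (sx, sy')
      pvClearLoop b.length b
    else
      pvDropLoop f stone sx sy' board

def drop_stone (stone : List (List Int)) (stone_x : Int) (stone_y : Int) (board : List (List Int)) : List (List Int) :=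
  pvDropLoop (((board.length : Int) - stone_y).toNat + board.length + 2) stone stone_x stone_y board

-- ===== PORT B =====

-- "y = stone_y + 1; while not check_collision(...): y += 1"
def pvFindLandY : Nat → List (List Int) → Int → Int → List (List Int) → Int
  | 0, _, _, y, _ => y
  | f + 1, stone, sx, y, board =>
    if check_collision board stone (sx, y) then y else pvFindLandY f stone sx (y + 1) board

def drop_stone_alt (stone : List (List Int)) (stone_x : Int) (stone_y : Int) (board : List (List Int)) : List (List Int) :=
  let y := pvFindLandY (((board.length : Int) - stone_y).toNat + board.length + 2) stone stone_x (stone_y + 1) board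
  let b := join_matrixes board stone (stone_x, y)
  let body := (PySem.List.slice b none (some (-1))).filter (fun row => row.contains (0 : Int))
  match PySem.List.pyGet? b (-1) with
  | none => []   -- empty board: Python B raises IndexError here (outside Pre_)
  | some last => List.replicate (b.length - 1 - body.length) pvZRow ++ body ++ [last]

-- ===== PRECONDITION & SPEC =====

-- board[r][c] is occupied or out of range (IndexError counts as a hit, as in A's try/except)
def pvHitP (board : List (List Int)) (r c : Int) : Prop :=
  (((PySem.List.pyGet? board r).bind (fun row => PySem.List.pyGet? row c)).getD 1) ≠ 0

-- some nonzero stone cell hits the board when the stone is offset by (sx, y)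
def pvCollidesP (stone board : List (List Int)) (sx y : Int) : Prop :=
  ∃ cy ∈ List.range stone.length, ∃ cx ∈ List.range (stone[cy]?.getD []).length,
    ((stone[cy]?.getD [])[cx]?.getD 0) ≠ 0 ∧ pvHitP board ((cy : Int) + y) ((cx : Int) + sx)

-- merging the stone at height y keeps every stone cell (zero or not) inside the board
def pvJoinSafeP (stone board : List (List Int)) (sx y : Int) : Prop :=
  ∀ cy ∈ List.range stone.length, ∀ cx ∈ List.range (stone[cy]?.getD []).length,
    PySem.Raise.InRange board.length ((cy : Int) + y - 1) ∧
    PySem.Raise.InRange ((PySem.List.pyGet? board ((cy : Int) + y - 1)).getD []).length ((cx : Int) + sx)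

-- Pre_: the stone collides immediately at stone_y + 1, or it has a landing height y — a first
-- colliding offset after stone_y + 1 (a collision is certain by y = board.length, and if the
-- stone does not collide at stone_y + 1 every block already sits within board range, so y lies
-- in the small stated window) — and merging there keeps every stone cell inside the board.
-- These are exactly the inputs on which A returns: with no collision ever A's drop loop never
-- stops (an all-zero stone), and with an unsafe merge join_matrixes raises IndexError.
def Pre_drop_stone (stone : List (List Int)) (stone_x : Int) (stone_y : Int) (board : List (List Int)) : Prop :=
  (pvCollidesP stone board stone_x (stone_y + 1) ∧ pvJoinSafeP stone board stone_x (stone_y + 1)) ∨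
  (¬ pvCollidesP stone board stone_x (stone_y + 1) ∧
    ∃ y ∈ PySem.List.pyRange (max (stone_y + 2) (-((board.length : Int) + stone.length + 1)))
        ((board.length : Int) + 1) 1,
      pvCollidesP stone board stone_x y ∧
      (∀ y' ∈ PySem.List.pyRange (max (stone_y + 2) (-((board.length : Int) + stone.length + 1)))
          y 1, ¬ pvCollidesP stone board stone_x y') ∧
      pvJoinSafeP stone board stone_x y)

instance (stone : List (List Int)) (stone_x : Int) (stone_y : Int) (board : List (List Int)) : Decidable (Pre_drop_stone stone stone_x stone_y board) := by
  unfold Pre_drop_stone pvCollidesP pvJoinSafeP pvHitP; infer_instance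

def pvWitness_drop_stone : List (List Int) × Int × Int × List (List Int) :=
  ([[1]], 0, 0, [[0], [0], [1]])

def Spec_drop_stone (stone : List (List Int)) (stone_x : Int) (stone_y : Int) (board : List (List Int)) (out : List (List Int)) : Prop := out = drop_stone_alt stone stone_x stone_y board
instance (stone : List (List Int)) (stone_x : Int) (stone_y : Int) (board : List (List Int)) (out : List (List Int)) : Decidable (Spec_drop_stone stone stone_x stone_y board out) := by unfold Spec_drop_stone; infer_instance

-- ===== CLAIM (what is proved, stated in full; the proofs are below) =====
def Claim_equal_drop_stone : Prop := ∀ (stone : List (List Int)) (stone_x : Int) (stone_y : Int) (board : List (List Int)), Dom_drop_stone stone stone_x stone_y board → Pre_drop_stone stone stone_x stone_y board → Spec_drop_stone stone stone_x stone_y board (drop_stone stone stone_x stone_y board)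

-- ===== LEMMAS AND PROOFS =====\n
-- (i, l[i]) is a member of enumerate l (shifted by the start s)
theorem pv_mem_enumerate {α : Type} (l : List α) (s : Int) (i : Nat) (hi : i < l.length) :
    ((s + (i : Int), l[i]) ∈ PySem.List.enumerate l s) := by
  induction l generalizing s i with
  | nil => simp at hi
  | cons x xs ih =>
    rw [PySem.List.enumerate_cons]
    cases i with
    | zero => simp
    | succ j =>
      right
      have hj : j < xs.length := by simpa using hi
      simpa [show s + ((j : Int) + 1) = s + 1 + (j : Int) by ring]
        using ih (s + 1) j hj

theorem pv_length_pvAddCell (m : List (List Int)) (i j v : Int) :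
    (pvAddCell m i j v).length = m.length := by
  unfold pvAddCell
  cases h1 : PySem.List.pyGet? m i with
  | none => rfl
  | some row =>
    cases h2 : PySem.List.pyGet? row j with
    | none => simp [h2]
    | some old => simp [h2, PySem.List.length_pySetD]

theorem pv_foldl_length {β : Type} (g : List (List Int) → β → List (List Int))
    (hg : ∀ m x, (g m x).length = m.length) :
    ∀ (l : List β) (m : List (List Int)), (l.foldl g m).length = m.length := by
  intro l
  induction l with
  | nil => intro m; rfl
  | cons x xs ih => intro m; rw [List.foldl_cons, ih, hg]

theorem pv_join_length (m1 m2 : List (List Int)) (off : Int × Int) :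
    (join_matrixes m1 m2 off).length = m1.length := by
  unfold join_matrixes
  apply pv_foldl_length
  intro m cr
  apply pv_foldl_length
  intro m' cv
  exact pv_length_pvAddCell _ _ _ _

-- a collision in the Pre_ sense is a collision for A's check_collision
theorem pv_collides_cc (stone board : List (List Int)) (sx y : Int)
    (h : pvCollidesP stone board sx y) :
    check_collision board stone (sx, y) = true := by
  obtain ⟨cy, hcymem, cx, hcxmem, hcne, hhit⟩ := h
  have hcy : cy < stone.length := List.mem_range.mp hcymem
  rw [List.getElem?_eq_getElem hcy] at hcxmem hcne
  simp only [Option.getD_some] at hcxmem hcne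
  have hcx : cx < stone[cy].length := List.mem_range.mp hcxmem
  rw [List.getElem?_eq_getElem hcx, Option.getD_some] at hcne
  unfold pvHitP at hhit
  unfold check_collision
  rw [List.any_eq_true]
  refine ⟨((0 : Int) + (cy : Int), stone[cy]), pv_mem_enumerate stone 0 cy hcy, ?_⟩
  rw [List.any_eq_true]
  refine ⟨((0 : Int) + (cx : Int), stone[cy][cx]), pv_mem_enumerate _ 0 cx hcx, ?_⟩
  simp only
  rw [show (0 : Int) + (cy : Int) + y = (cy : Int) + y from by ring,
    show (0 : Int) + (cx : Int) + sx = (cx : Int) + sx from by ring]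
  cases hbg : PySem.List.pyGet? board ((cy : Int) + y) with
  | none => simp [hcne]
  | some row =>
    rw [hbg] at hhit
    simp only [Option.bind_some] at hhit
    cases hrg : PySem.List.pyGet? row ((cx : Int) + sx) with
    | none => simp [hrg, hcne]
    | some v =>
      rw [hrg] at hhit
      simp only [Option.getD_some] at hhit
      simp [hrg, hcne, hhit]

-- A's drop loop agrees with "find landing height first, then merge and clear"
theorem pv_drop_align (stone board : List (List Int)) (sx : Int) :
    ∀ (f : Nat) (y : Int), (∃ k : Nat, k < f ∧ check_collision board stone (sx, y + 1 + (k : Int)) = true) →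
      pvDropLoop f stone sx y board =
        (let b := join_matrixes board stone (sx, pvFindLandY f stone sx (y + 1) board)
         pvClearLoop b.length b) := by
  intro f
  induction f with
  | zero =>
    intro y h
    obtain ⟨k, hk, -⟩ := h
    omega
  | succ f ih =>
    intro y h
    obtain ⟨k, hk, hcc⟩ := h
    by_cases hc : check_collision board stone (sx, y + 1) = true
    · simp [pvDropLoop, pvFindLandY, hc]
    · have hk0 : k ≠ 0 := by
        intro h; apply hc; simpa [h] using hcc
      have hstep := ih (y + 1) ⟨k - 1, by omega, by
        have heq : y + 1 + 1 + ((k - 1 : Nat) : Int) = y + 1 + (k : Int) := by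
          omega
        rw [heq]; exact hcc⟩
      rw [show pvDropLoop (f + 1) stone sx y board = pvDropLoop f stone sx (y + 1) board from by
          simp [pvDropLoop, hc],
        show pvFindLandY (f + 1) stone sx (y + 1) board = pvFindLandY f stone sx (y + 1 + 1) board from by
          simp [pvFindLandY, hc]]
      exact hstep

-- A's clearing loop, in closed form: blank rows ++ kept rows ++ bottom row
theorem pv_clear_eq :
    ∀ (f : Nat) (b : List (List Int)) (hb : b ≠ []), b.dropLast.countP pvFull < f →
      pvClearLoop f b =
        List.replicate (b.dropLast.countP pvFull) pvZRow ++
          b.dropLast.filter (fun row => row.contains (0 : Int)) ++ [b.getLast hb] := by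
  intro f
  induction f with
  | zero => intro b hb hlt; omega
  | succ f ih =>
    intro b hb hlt
    simp only [pvClearLoop]
    rw [PySem.List.slice_to_neg_one]
    cases hfind : b.dropLast.findIdx? pvFull with
    | none =>
      rw [List.findIdx?_eq_none_iff] at hfind
      have hc0 : b.dropLast.countP pvFull = 0 :=
        List.countP_eq_zero.mpr (by intro a ha; simp [hfind a ha])
      have hfilt : b.dropLast.filter (fun row => row.contains (0 : Int)) = b.dropLast :=
        List.filter_eq_self.mpr (by intro a ha; simpa [pvFull] using hfind a ha)
      rw [hc0, hfilt]
      simpa using (List.dropLast_append_getLast hb).symm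
    | some i =>
      obtain ⟨hi, hfull, -⟩ := List.findIdx?_eq_some_iff_getElem.mp hfind
      have hbl : b.dropLast ++ [b.getLast hb] = b := List.dropLast_append_getLast hb
      have herase : b.eraseIdx i = b.dropLast.eraseIdx i ++ [b.getLast hb] := by
        conv_lhs => rw [← hbl]
        exact List.eraseIdx_append_of_lt_length hi _
      have hldecomp : b.dropLast
          = b.dropLast.take i ++ b.dropLast[i] :: b.dropLast.drop (i + 1) := by
        conv_lhs => rw [← List.take_append_drop i b.dropLast]
        rw [List.drop_eq_getElem_cons hi]
      have herdecomp : b.dropLast.eraseIdx i = b.dropLast.take i ++ b.dropLast.drop (i + 1) :=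
        List.eraseIdx_eq_take_drop_succ _ i
      have hfz : pvFull pvZRow = false := by decide
      have hhz : (pvZRow.contains (0 : Int)) = true := by decide
      have hhfull : (b.dropLast[i].contains (0 : Int)) = false := by
        simpa [pvFull] using hfull
      have hz0 : (pvZRow :: b.dropLast.eraseIdx i).countP pvFull
          = (b.dropLast.eraseIdx i).countP pvFull := by
        rw [List.countP_cons, hfz]
        simp
      have hcount : b.dropLast.countP pvFull
          = (pvZRow :: b.dropLast.eraseIdx i).countP pvFull + 1 := by
        rw [hz0, herdecomp]
        conv_lhs => rw [hldecomp]
        rw [List.countP_append, List.countP_append, List.countP_cons, hfull]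
        simp
        omega
      have hfilter : (pvZRow :: b.dropLast.eraseIdx i).filter (fun row => row.contains (0 : Int))
          = pvZRow :: b.dropLast.filter (fun row => row.contains (0 : Int)) := by
        rw [herdecomp]
        conv_rhs => rw [hldecomp]
        simp only [List.filter_append, List.filter_cons, hhz, hhfull]
        simp
      have hb' : (pvZRow :: b.eraseIdx i) ≠ [] := by simp
      have hdl' : (pvZRow :: b.eraseIdx i).dropLast = pvZRow :: b.dropLast.eraseIdx i := by
        rw [herase, ← List.cons_append]
        exact List.dropLast_concat
      have hgl' : (pvZRow :: b.eraseIdx i).getLast hb' = b.getLast hb := by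
        rw [List.getLast_eq_iff_getLast?_eq_some, herase, ← List.cons_append]
        exact List.getLast?_concat
      have hcnt' : (pvZRow :: b.eraseIdx i).dropLast.countP pvFull < f := by
        rw [hdl']; omega
      have hIH := ih (pvZRow :: b.eraseIdx i) hb' hcnt'
      show pvClearLoop f (pvZRow :: b.eraseIdx i) = _
      rw [hIH, hdl', hgl', hfilter, hcount, List.replicate_succ']
      simp

-- B's single pass computes the same closed form
theorem pv_alt_finish (b : List (List Int)) (hb : b ≠ []) :
    (let body := (PySem.List.slice b none (some (-1))).filter (fun row => row.contains (0 : Int))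
     match PySem.List.pyGet? b (-1) with
     | none => ([] : List (List Int))
     | some last => List.replicate (b.length - 1 - body.length) pvZRow ++ body ++ [last]) =
      List.replicate (b.dropLast.countP pvFull) pvZRow ++
        b.dropLast.filter (fun row => row.contains (0 : Int)) ++ [b.getLast hb] := by
  have hget : PySem.List.pyGet? b (-1) = some (b.getLast hb) := by
    rw [PySem.List.pyGet?_neg_one]
    simp [List.getLast?_eq_some_getLast hb]
  simp only [PySem.List.slice_to_neg_one, hget]
  have hflen : (b.dropLast.filter (fun row => row.contains (0 : Int))).length
      = b.dropLast.countP (fun row => row.contains (0 : Int)) := by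
    exact Eq.symm List.countP_eq_length_filter
  have hsplit := List.length_eq_countP_add_countP
    (fun row : List Int => row.contains (0 : Int)) (l := b.dropLast)
  have hfull : b.dropLast.countP
        (fun a => decide ¬((fun row : List Int => row.contains (0 : Int)) a = true))
      = b.dropLast.countP pvFull := by
    apply List.countP_congr
    intro a _
    simp [pvFull]
  rw [hfull] at hsplit
  have hdl : b.dropLast.length = b.length - 1 := by simp
  have hcount : b.length - 1 - (b.dropLast.filter (fun row => row.contains (0 : Int))).length
      = b.dropLast.countP pvFull := by
    rw [hflen]; omega
  rw [hcount]

-- a colliding, safely-merging stone forces a nonempty board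
theorem pv_board_ne (stone board : List (List Int)) (sx y : Int)
    (hcol : pvCollidesP stone board sx y) (hsafe : pvJoinSafeP stone board sx y) :
    board ≠ [] := by
  intro h
  obtain ⟨cy, hcymem, cx, hcxmem, -, -⟩ := hcol
  have hs := (hsafe cy hcymem cx hcxmem).1
  rw [h] at hs
  unfold PySem.Raise.InRange at hs
  simp at hs
  omega

-- the common tail: collision at y (reached within the fuel bound) gives A = B
theorem pv_final_common (stone : List (List Int)) (sx sy : Int) (board : List (List Int))
    (y : Int) (hb : board ≠ []) (hy1 : sy + 1 ≤ y)
    (hk : (y - sy - 1).toNat < ((board.length : Int) - sy).toNat + board.length + 2)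
    (hcol : pvCollidesP stone board sx y) :
    drop_stone stone sx sy board = drop_stone_alt stone sx sy board := by
  have hcc : check_collision board stone (sx, sy + 1 + (((y - sy - 1).toNat : Nat) : Int)) = true := by
    rw [show sy + 1 + (((y - sy - 1).toNat : Nat) : Int) = y from by omega]
    exact pv_collides_cc stone board sx y hcol
  unfold drop_stone drop_stone_alt
  rw [pv_drop_align stone board sx (((board.length : Int) - sy).toNat + board.length + 2) sy
    ⟨(y - sy - 1).toNat, hk, hcc⟩]
  set b := join_matrixes board stone
    (sx, pvFindLandY (((board.length : Int) - sy).toNat + board.length + 2) stone sx (sy + 1) board) with hbdef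
  have hblen : b.length = board.length := pv_join_length _ _ _
  have hbne : b ≠ [] := by
    intro h
    rw [h] at hblen
    exact hb (List.length_eq_zero_iff.mp hblen.symm)
  have hfuel : b.dropLast.countP pvFull < b.length := by
    have h1 := List.countP_le_length (p := pvFull) (l := b.dropLast)
    have h2 : b.dropLast.length = b.length - 1 := by simp
    have h3 : 1 ≤ b.length := List.length_pos_iff.mpr hbne
    omega
  rw [pv_clear_eq b.length b hbne hfuel]
  exact (pv_alt_finish b hbne).symm

-- ===== VERDICT (by name: the statement is the Claim_ definition above) =====
theorem drop_stone_spec : Claim_equal_drop_stone := by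
  intro stone sx sy board _hdom hpre
  unfold Spec_drop_stone
  rcases hpre with ⟨hcol, hsafe⟩ | ⟨-, y, hymem, hcol, -, hsafe⟩
  · exact pv_final_common stone sx sy board (sy + 1)
      (pv_board_ne stone board sx (sy + 1) hcol hsafe) le_rfl (by omega) hcol
  · obtain ⟨hyL, hyn⟩ := PySem.List.mem_pyRange_one.mp hymem
    have hy2 : sy + 2 ≤ y := le_trans (le_max_left _ _) hyL
    exact pv_final_common stone sx sy board y
      (pv_board_ne stone board sx y hcol hsafe) (by omega) (by omega) hcol
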